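-- pv_equiv track=rewrite | github.com/Danncode10/100AlgorithmsChallenge | arrayConversion/14. Python.py | arrayConversion
-- ===== SOURCE A (Python) =====
-- def arrayConversion(inputArray):
--     iteration = 1
--     while len(inputArray) > 1:
--         temp = []
--         for i in range(0, len(inputArray), 2):
--             if iteration % 2 == 1:  # Odd iteration: Sum
--                 temp.append(inputArray[i] + inputArray[i + 1])
--             else:  # Even iteration: Product
--                 temp.append(inputArray[i] * inputArray[i + 1])
--         inputArray = temp
--         iteration += 1
--     return inputArray[0]
-- ===== SOURCE B (Python) =====
-- def arrayConversion(inputArray):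
--     # Recursive decomposition: one pairing pass via zip over a shared iterator,
--     # alternating a sum/product flag instead of counting iterations.
--     def collapse(arr, add):
--         if len(arr) <= 1:
--             return arr[0]
--         it = iter(arr)
--         nxt = [x + y if add else x * y for x, y in zip(it, it)]
--         return collapse(nxt, not add)
--     return collapse(inputArray, True)
-- ===== Notes on version B (the rewrite author's own statement) =====
-- stated objective: alternative
-- what changed: Replaces the iteration-counter while-loop with index arithmetic by a recursive collapse carrying an alternating Boolean flag, pairing consecutive elements via zip over one iterator instead of range(0,len,2) indexing.
import Mathlib
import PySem

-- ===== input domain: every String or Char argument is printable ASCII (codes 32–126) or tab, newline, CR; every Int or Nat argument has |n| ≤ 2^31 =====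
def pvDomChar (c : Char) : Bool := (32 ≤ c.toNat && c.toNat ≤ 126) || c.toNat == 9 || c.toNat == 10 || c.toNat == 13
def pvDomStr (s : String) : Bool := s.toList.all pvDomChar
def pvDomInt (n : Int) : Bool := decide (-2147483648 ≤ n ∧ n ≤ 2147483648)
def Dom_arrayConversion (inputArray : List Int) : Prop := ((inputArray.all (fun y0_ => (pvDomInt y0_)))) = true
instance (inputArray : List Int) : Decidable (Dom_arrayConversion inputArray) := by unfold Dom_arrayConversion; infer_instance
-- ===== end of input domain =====

-- B replaces A's iteration-counter while-loop with range(0,len,2) indexing by a recursive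
-- collapse carrying an alternating Boolean flag, pairing consecutive elements via zip over
-- one shared iterator (objective: alternative decomposition, same cost).

-- ===== PORT A =====
-- length of range(0, n, 2), cited by the while-loop's termination proof
theorem pvLenRangeTwo (n : Nat) : (PySem.List.pyRange 0 (n : Int) 2).length = (n + 1) / 2 := by
  rw [PySem.List.pyRange_of_pos 0 (n : Int) (by norm_num)]
  simp only [List.length_map, List.length_range]
  split_ifs with h
  · omega
  · omega

-- while len(inputArray) > 1: temp = []; for i in range(0, len(inputArray), 2): temp.append(...)
def arrayConversionLoop (arr : List Int) (iteration : Int) : Int :=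
  if 1 < arr.length then
    let temp := (PySem.List.pyRange 0 (arr.length : Int) 2).map (fun i =>
      if PySem.Int.mod iteration 2 = 1 then
        PySem.List.pyGetD arr i 0 + PySem.List.pyGetD arr (i + 1) 0
      else
        PySem.List.pyGetD arr i 0 * PySem.List.pyGetD arr (i + 1) 0)
    arrayConversionLoop temp (iteration + 1)
  else
    PySem.List.pyGetD arr 0 0
termination_by arr.length
decreasing_by
  simp only [List.length_map, pvLenRangeTwo]
  omega

def arrayConversion (inputArray : List Int) : Int :=
  arrayConversionLoop inputArray 1

-- ===== PORT B =====
-- nxt = [x + y if add else x * y for x, y in zip(it, it)]  (consecutive pairs; odd tail dropped)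
def pvPairStep (arr : List Int) (add : Bool) : List Int :=
  match arr with
  | x :: y :: rest => (if add then x + y else x * y) :: pvPairStep rest add
  | _ => []

-- cited by pvCollapse's termination proof
theorem pvPairStep_length (arr : List Int) (add : Bool) :
    (pvPairStep arr add).length = arr.length / 2 := by
  induction arr using pvPairStep.induct with
  | case1 x y rest ih => simp [pvPairStep, ih]; omega
  | case2 t h => cases t with
    | nil => simp [pvPairStep]
    | cons a t' => cases t' with
      | nil => simp [pvPairStep]
      | cons b t'' => exact absurd rfl (h a b t'')

def pvCollapse (arr : List Int) (add : Bool) : Int :=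
  if arr.length ≤ 1 then PySem.List.pyGetD arr 0 0
  else pvCollapse (pvPairStep arr add) (!add)
termination_by arr.length
decreasing_by
  simp only [pvPairStep_length]
  omega

def arrayConversion_alt (inputArray : List Int) : Int :=
  pvCollapse inputArray true

-- ===== PRECONDITION & SPEC =====
-- Pre_ admits exactly the inputs where Python A returns: lists whose length is a power
-- of two (on any other length, including the empty list, A raises IndexError).
def Pre_arrayConversion (inputArray : List Int) : Prop :=
  ∃ k, k ≤ inputArray.length ∧ inputArray.length = 2 ^ k
instance (inputArray : List Int) : Decidable (Pre_arrayConversion inputArray) := by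
  unfold Pre_arrayConversion; infer_instance
def pvWitness_arrayConversion : List Int := [1, 2, 3, 4]

def Spec_arrayConversion (inputArray : List Int) (out : Int) : Prop := out = arrayConversion_alt inputArray
instance (inputArray : List Int) (out : Int) : Decidable (Spec_arrayConversion inputArray out) := by unfold Spec_arrayConversion; infer_instance

-- ===== CLAIM (what is proved, stated in full; the proofs are below) =====
def Claim_equal_arrayConversion : Prop := ∀ (inputArray : List Int), Dom_arrayConversion inputArray → Pre_arrayConversion inputArray → Spec_arrayConversion inputArray (arrayConversion inputArray)

-- ===== LEMMAS AND PROOFS =====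

theorem pvGetD_cons2 (x y : Int) (l : List Int) (i : Int) (hi : 0 ≤ i) :
    PySem.List.pyGetD (x :: y :: l) (i + 2) 0 = PySem.List.pyGetD l i 0 := by
  rw [PySem.List.pyGetD_of_nonneg _ _ (by omega), PySem.List.pyGetD_of_nonneg _ _ hi]
  have h2 : (i + 2).toNat = i.toNat + 2 := by omega
  simp [h2]

theorem pvRange_two_cons (n : Int) (h : 2 ≤ n) :
    PySem.List.pyRange 0 n 2 = 0 :: (PySem.List.pyRange 0 (n - 2) 2).map (· + 2) := by
  rw [PySem.List.pyRange_of_pos 0 n (by norm_num),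
      PySem.List.pyRange_of_pos 0 (n - 2) (by norm_num)]
  have e1 : (if (0:Int) < n then ((n - 0 + 2 - 1) / 2).toNat else 0) = ((n + 1) / 2).toNat := by
    rw [if_pos (by omega)]; ring_nf
  have e2 : (if (0:Int) < n - 2 then ((n - 2 - 0 + 2 - 1) / 2).toNat else 0) = ((n - 1) / 2).toNat := by
    split_ifs with h2
    · ring_nf
    · have : n = 2 := by omega
      simp [this]
  rw [e1, e2]
  have hm : ((n + 1) / 2).toNat = ((n - 1) / 2).toNat + 1 := by omega
  rw [hm, List.range_succ_eq_map, List.map_cons, List.map_map, List.map_map]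
  constructor

-- one pairing pass of A's inner for-loop equals B's pvPairStep (even lengths)
theorem pvStep_eq (arr : List Int) (add : Bool) (heven : arr.length % 2 = 0) :
    ((PySem.List.pyRange 0 (arr.length : Int) 2).map (fun i =>
      if add then PySem.List.pyGetD arr i 0 + PySem.List.pyGetD arr (i + 1) 0
      else PySem.List.pyGetD arr i 0 * PySem.List.pyGetD arr (i + 1) 0)) = pvPairStep arr add := by
  induction arr using pvPairStep.induct with
  | case1 x y rest ih =>
    have hlen : ((x :: y :: rest).length : Int) = (rest.length : Int) + 2 := by
      push_cast [List.length_cons]; ring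
    rw [hlen, pvRange_two_cons _ (by omega)]
    have hsub : ((rest.length : Int) + 2 - 2) = (rest.length : Int) := by ring
    rw [hsub, List.map_cons, List.map_map]
    have hrest : rest.length % 2 = 0 := by simp at heven; omega
    have h0 : PySem.List.pyGetD (x :: y :: rest) 0 0 = x := by
      rw [PySem.List.pyGetD_of_nonneg _ _ (by omega)]; simp
    have h1 : PySem.List.pyGetD (x :: y :: rest) 1 0 = y := by
      rw [PySem.List.pyGetD_of_nonneg _ _ (by omega)]; simp
    have htail : ∀ i ∈ PySem.List.pyRange 0 (rest.length : Int) 2,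
        ((fun i => if add then PySem.List.pyGetD (x :: y :: rest) i 0 + PySem.List.pyGetD (x :: y :: rest) (i + 1) 0
          else PySem.List.pyGetD (x :: y :: rest) i 0 * PySem.List.pyGetD (x :: y :: rest) (i + 1) 0) ∘ (· + 2)) i
        = (fun i => if add then PySem.List.pyGetD rest i 0 + PySem.List.pyGetD rest (i + 1) 0
          else PySem.List.pyGetD rest i 0 * PySem.List.pyGetD rest (i + 1) 0) i := by
      intro i hi
      have hpos : 0 ≤ i := ((PySem.List.mem_pyRange_iff_of_pos (by norm_num) i).mp hi).1
      simp only [Function.comp]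
      rw [show i + 2 + 1 = (i + 1) + 2 from by ring,
          pvGetD_cons2 x y rest (i + 1) (by omega),
          pvGetD_cons2 x y rest i hpos]
    rw [List.map_congr_left htail, ih hrest]
    simp [pvPairStep, h0, h1]
  | case2 t h =>
    cases t with
    | nil => simp [pvPairStep, PySem.List.pyRange_of_pos 0 0 (by norm_num : (0:Int) < 2)]
    | cons a t' => cases t' with
      | nil => simp at heven
      | cons b t'' => exact absurd rfl (h a b t'')

theorem pvMod_flip (it : Int) :
    (decide (PySem.Int.mod (it + 1) 2 = 1)) = !(decide (PySem.Int.mod it 2 = 1)) := by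
  rw [PySem.Int.mod_eq_emod_of_pos (by norm_num), PySem.Int.mod_eq_emod_of_pos (by norm_num)]
  by_cases hp : it % 2 = 1
  · simp [hp, show (it + 1) % 2 = 0 from by omega]
  · simp [hp, show (it + 1) % 2 = 1 from by omega]

theorem pvLoop_eq (k : Nat) (arr : List Int) (it : Int) (hlen : arr.length = 2 ^ k) :
    arrayConversionLoop arr it = pvCollapse arr (decide (PySem.Int.mod it 2 = 1)) := by
  induction k generalizing arr it with
  | zero =>
    rw [arrayConversionLoop, pvCollapse]
    simp only [pow_zero] at hlen
    rw [if_neg (by omega), if_pos (by omega)]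
  | succ n ih =>
    rw [arrayConversionLoop, pvCollapse]
    have hgt : 1 < arr.length := by rw [hlen]; exact Nat.one_lt_two_pow (by omega)
    rw [if_pos hgt, if_neg (by omega)]
    have heven : arr.length % 2 = 0 := by rw [hlen]; rw [pow_succ]; omega
    have hstep := pvStep_eq arr (decide (PySem.Int.mod it 2 = 1)) heven
    simp only [decide_eq_true_eq] at hstep
    rw [hstep]
    have hlen2 : (pvPairStep arr (decide (PySem.Int.mod it 2 = 1))).length = 2 ^ n := by
      rw [pvPairStep_length, hlen]; rw [pow_succ]; omega
    rw [ih _ _ hlen2, pvMod_flip]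

-- ===== VERDICT (by name: the statement is the Claim_ definition above) =====
theorem arrayConversion_spec : Claim_equal_arrayConversion := by
  intro arr _ hpre
  obtain ⟨k, _, hlen⟩ := hpre
  unfold Spec_arrayConversion arrayConversion arrayConversion_alt
  have h1 : (decide (PySem.Int.mod 1 2 = 1)) = true := by decide
  rw [pvLoop_eq k arr 1 hlen, h1]
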